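-- pv_equiv track=rewrite | github.com/thigazzz/autopin | tests/factory/make_fake_html.py | add_image_element_to_html
-- ===== SOURCE A (Python) =====
-- def add_image_element_to_html(html: str, number_of_elements: int) -> str:
--     for i in list(range(1, number_of_elements + 1)):
--         html += """
--         \n
--
--         <div data-test-id="pin-visual-wrapper" class="XiG zI7 iyn Hsu" style="margin-top:0%;margin-bottom:0%">
--             <div class="Pj7 sLG XiG ho- m1e">
--                 <div class="XiG zI7 iyn Hsu" style="background-color:#b07555;padding-bottom:177.54237288135593%">
--                     <img alt="any" class="hCL kVc L4E MIw" fetchpriority="auto" loading="auto" src="any" />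
--                 </div>
--                 <div class="KPc MIw ojN Rym p6V QLY">
--                 </div>
--             </div>
--         </div>
--
--         \n
--
--         """
--
--     return html
-- ===== SOURCE B (Python) =====
-- _BLOCK = """
--         \n
--
--         <div data-test-id="pin-visual-wrapper" class="XiG zI7 iyn Hsu" style="margin-top:0%;margin-bottom:0%">
--             <div class="Pj7 sLG XiG ho- m1e">
--                 <div class="XiG zI7 iyn Hsu" style="background-color:#b07555;padding-bottom:177.54237288135593%">
--                     <img alt="any" class="hCL kVc L4E MIw" fetchpriority="auto" loading="auto" src="any" />
--                 </div>
--                 <div class="KPc MIw ojN Rym p6V QLY">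
--                 </div>
--             </div>
--         </div>
--
--         \n
--
--         """
--
--
-- def add_image_element_to_html(html: str, number_of_elements: int) -> str:
--     return html + _BLOCK * number_of_elements
-- ===== Notes on version B (the rewrite author's own statement) =====
-- stated objective: simpler
-- what changed: Replaces A's for-loop that appends the HTML block N times by a single closed-form string repetition html + BLOCK * N.
import Mathlib
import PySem

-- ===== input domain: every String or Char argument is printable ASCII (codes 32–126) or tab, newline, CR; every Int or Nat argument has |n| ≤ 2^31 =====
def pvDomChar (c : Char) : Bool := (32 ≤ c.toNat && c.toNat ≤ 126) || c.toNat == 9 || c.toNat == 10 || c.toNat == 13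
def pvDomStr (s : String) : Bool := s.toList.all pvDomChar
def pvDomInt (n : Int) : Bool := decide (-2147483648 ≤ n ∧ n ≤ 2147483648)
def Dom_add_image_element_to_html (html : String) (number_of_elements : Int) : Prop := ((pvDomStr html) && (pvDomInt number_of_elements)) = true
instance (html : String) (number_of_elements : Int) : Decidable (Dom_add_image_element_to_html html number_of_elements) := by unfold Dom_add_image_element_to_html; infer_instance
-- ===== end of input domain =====

-- B replaces A's accumulating for-loop by a single closed-form string repetition (simpler, no loop).

-- the fixed HTML block literal both Pythons carry (byte-identical)
def pvBlock : String := "\n        \n\n\n        <div data-test-id=\"pin-visual-wrapper\" class=\"XiG zI7 iyn Hsu\" style=\"margin-top:0%;margin-bottom:0%\">\n            <div class=\"Pj7 sLG XiG ho- m1e\">\n                <div class=\"XiG zI7 iyn Hsu\" style=\"background-color:#b07555;padding-bottom:177.54237288135593%\">\n                    <img alt=\"any\" class=\"hCL kVc L4E MIw\" fetchpriority=\"auto\" loading=\"auto\" src=\"any\" />\n                </div>\n                <div class=\"KPc MIw ojN Rym p6V QLY\">\n                </div>\n            </div>\n        </div>\n\n        \n\n\n        "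

-- ===== PORT A =====
-- for i in list(range(1, n+1)): html += BLOCK; return html
def add_image_element_to_html (html : String) (number_of_elements : Int) : String :=
  (PySem.List.pyRange 1 (number_of_elements + 1) 1).foldl (fun acc _ => acc ++ pvBlock) html

-- ===== PORT B =====
-- return html + BLOCK * n   (Python string repetition; empty for n ≤ 0)
def add_image_element_to_html_alt (html : String) (number_of_elements : Int) : String :=
  html ++ String.join (List.replicate number_of_elements.toNat pvBlock)

-- ===== PRECONDITION & SPEC =====
def Spec_add_image_element_to_html (html : String) (number_of_elements : Int) (out : String) : Prop := out = add_image_element_to_html_alt html number_of_elements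
instance (html : String) (number_of_elements : Int) (out : String) : Decidable (Spec_add_image_element_to_html html number_of_elements out) := by unfold Spec_add_image_element_to_html; infer_instance

-- ===== CLAIM (what is proved, stated in full; the proofs are below) =====
def Claim_equal_add_image_element_to_html : Prop := ∀ (html : String) (number_of_elements : Int), Dom_add_image_element_to_html html number_of_elements → Spec_add_image_element_to_html html number_of_elements (add_image_element_to_html html number_of_elements)

-- ===== LEMMAS AND PROOFS =====
theorem foldl_append_shift : ∀ (l : List String) (a : String),
    l.foldl (fun r s => r ++ s) a = a ++ l.foldl (fun r s => r ++ s) "" := by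
  intro l
  induction l with
  | nil => intro a; simp
  | cons x xs ih =>
      intro a
      simp only [List.foldl_cons]
      rw [ih (a ++ x), ih ("" ++ x)]
      simp [String.append_assoc]

theorem foldl_append_const (b : String) : ∀ (l : List Int) (h : String),
    l.foldl (fun acc _ => acc ++ b) h = h ++ String.join (List.replicate l.length b) := by
  intro l
  induction l with
  | nil => intro h; simp [String.join]
  | cons x xs ih =>
      intro h
      simp only [List.foldl_cons, List.length_cons, List.replicate_succ, String.join, List.foldl]
      rw [ih]
      rw [foldl_append_shift]; simp [String.join, String.append_assoc]

-- ===== VERDICT (by name: the statement is the Claim_ definition above) =====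
theorem add_image_element_to_html_spec : Claim_equal_add_image_element_to_html := by
  intro html n _
  unfold Spec_add_image_element_to_html add_image_element_to_html add_image_element_to_html_alt
  rw [foldl_append_const, PySem.List.length_pyRange_one]
  have : n + 1 - 1 = n := by ring
  rw [this]
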